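/- GENERATED by c/gen_decode.py: decode facts of the image, one per distinct instruction byte string. -/
import UserX.DecodeImage

#decode_all Toyh.Dec
  "4883c001"  -- add rax,0x1
  "7f0a"  -- jg 1050f5
  "ebf1"  -- jmp 10504a
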